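-- pv_equiv track=rewrite | github.com/vrishank-cmd/Whatsapp-Bot | ai_features.py | validate_secure_input
-- ===== SOURCE A (Python) =====
-- def validate_secure_input(input_data: str) -> bool:
--     """Validate input for security threats"""
--     dangerous_patterns = [
--         "script",
--         "javascript:",
--         "onload=",
--         "onerror=",
--         "../",
--         "..\\",
--         "/etc/passwd",
--         "cmd.exe",
--     ]
--
--     input_lower = input_data.lower()
--     for pattern in dangerous_patterns:
--         if pattern in input_lower:
--             return False
--     return True
-- ===== SOURCE B (Python) =====
-- def validate_secure_input(input_data: str) -> bool:
--     """Validate input for security threats"""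
--     dangerous_patterns = [
--         "script",
--         "javascript:",
--         "onload=",
--         "onerror=",
--         "../",
--         "..\\",
--         "/etc/passwd",
--         "cmd.exe",
--     ]
--
--     # Stream the input one character at a time, keeping only a sliding window of
--     # the last 11 lowered characters (11 = length of the longest pattern).  A
--     # pattern occurs in the lowered input iff at some step it is a suffix of the
--     # window, so no whole-string scan or full lowered copy is ever built.
--     window = ""
--     for ch in input_data:
--         window = (window + ch.lower())[-11:]
--         for pattern in dangerous_patterns:
--             if window.endswith(pattern):
--                 return False
--     return True
-- ===== Notes on version B (the rewrite author's own statement) =====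
-- stated objective: alternative
-- what changed: Replaces A's per-pattern whole-string substring scans with a single streaming pass that lowers one character at a time, maintains a sliding window of the last 11 lowered characters, and rejects as soon as any pattern is a suffix of the window.
import Mathlib
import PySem

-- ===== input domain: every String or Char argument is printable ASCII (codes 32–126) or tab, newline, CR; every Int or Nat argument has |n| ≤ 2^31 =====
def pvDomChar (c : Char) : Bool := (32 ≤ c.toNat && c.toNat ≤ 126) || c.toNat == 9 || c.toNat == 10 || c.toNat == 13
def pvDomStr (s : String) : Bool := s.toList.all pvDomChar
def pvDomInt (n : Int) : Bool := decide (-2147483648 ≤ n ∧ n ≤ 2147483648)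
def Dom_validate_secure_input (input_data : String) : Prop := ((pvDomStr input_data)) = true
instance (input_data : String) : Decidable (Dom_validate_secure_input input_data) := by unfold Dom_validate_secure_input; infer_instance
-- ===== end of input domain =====

-- B replaces A's per-pattern whole-string substring scans by one streaming pass that lowers
-- one character at a time and keeps a sliding window of the last 11 lowered characters,
-- rejecting when a pattern is a suffix of the window (objective: alternative, same cost).

def pvDangerousPatterns : List String :=
  ["script", "javascript:", "onload=", "onerror=", "../", "..\\", "/etc/passwd", "cmd.exe"]

-- ===== PORT A =====
-- A's for-loop over patterns with early return False
def pvLoopA (pats : List String) (input_lower : String) : Bool :=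
  match pats with
  | [] => true
  | p :: rest => if PySem.Str.isIn p input_lower then false else pvLoopA rest input_lower

def validate_secure_input (input_data : String) : Bool :=
  pvLoopA pvDangerousPatterns (PySem.Str.lower input_data)

-- ===== PORT B =====
-- '(window + ch.lower())[-11:]': the last 11 characters, i.e. drop (length - 11)
-- (exact: Python's s[-11:] is the whole string when len(s) < 11, and Nat '-' truncates at 0).
def pvPush (w : List Char) (c : Char) : List Char :=
  let w' := w ++ [PySem.Chars.lowerChar c]
  w'.drop (w'.length - 11)

-- B's for-loop over the characters of input_data carrying the window accumulator
def pvLoopB (w : List Char) (cs : List Char) : Bool :=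
  match cs with
  | [] => true
  | c :: t =>
      let w' := pvPush w c
      if pvDangerousPatterns.any (fun p => PySem.Chars.endswith w' p.toList) then false
      else pvLoopB w' t

def validate_secure_input_alt (input_data : String) : Bool :=
  pvLoopB [] input_data.toList

-- ===== PRECONDITION & SPEC =====
def Spec_validate_secure_input (input_data : String) (out : Bool) : Prop := out = validate_secure_input_alt input_data
instance (input_data : String) (out : Bool) : Decidable (Spec_validate_secure_input input_data out) := by unfold Spec_validate_secure_input; infer_instance

-- ===== CLAIM (what is proved, stated in full; the proofs are below) =====
def Claim_equal_validate_secure_input : Prop := ∀ (input_data : String), Dom_validate_secure_input input_data → Spec_validate_secure_input input_data (validate_secure_input input_data)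

-- ===== LEMMAS AND PROOFS =====

def pvWin (l : List Char) : List Char := l.drop (l.length - 11)

theorem pvWin_suffix_iff (p x : List Char) (hp : p.length ≤ 11) :
    p <:+ pvWin x ↔ p <:+ x := by
  constructor
  · intro h; exact h.trans (List.drop_suffix _ _)
  · rintro ⟨a, rfl⟩
    refine ⟨a.drop ((a ++ p).length - 11), ?_⟩
    simp only [pvWin, List.drop_append]
    have : (a ++ p).length - 11 - a.length = 0 := by simp; omega
    rw [this, List.drop_zero]

theorem pvWin_append (x y : List Char) :
    pvWin (pvWin x ++ y) = pvWin (x ++ y) := by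
  simp only [pvWin, List.drop_append, List.length_append, List.length_drop, List.drop_drop]
  congr 1 <;> (congr 1; omega)

theorem pvWin_suffix_append_iff (p x y : List Char) (hp : p.length ≤ 11) :
    p <:+ pvWin x ++ y ↔ p <:+ x ++ y := by
  rw [← pvWin_suffix_iff p (pvWin x ++ y) hp, pvWin_append, pvWin_suffix_iff p (x ++ y) hp]

theorem pvPatterns_len : ∀ p ∈ pvDangerousPatterns, p.toList.length ≤ 11 := by decide

theorem pvPatterns_ne : ∀ p ∈ pvDangerousPatterns, p.toList ≠ [] := by decide

-- A's loop characterisation: true iff no pattern is an infix of the lowered string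
theorem pvLoopA_iff (pats : List String) (low : String) :
    pvLoopA pats low = true ↔ ∀ p ∈ pats, ¬ p.toList <:+: low.toList := by
  induction pats with
  | nil => simp [pvLoopA]
  | cons p rest ih =>
      simp only [pvLoopA]
      by_cases h : PySem.Str.isIn p low = true
      · rw [if_pos h]
        constructor
        · intro hf; exact absurd hf (by simp)
        · intro hall
          exact absurd ((PySem.Str.isIn_iff_infix p low).mp h) (hall p (by simp))
      · have hni : ¬ p.toList <:+: low.toList := fun hc => h ((PySem.Str.isIn_iff_infix p low).mpr hc)
        rw [if_neg h, ih]
        simp only [List.forall_mem_cons]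
        exact ⟨fun hr => ⟨hni, hr⟩, And.right⟩

-- B's loop invariant: true iff no pattern is a suffix of w extended by a nonempty
-- prefix of the lowered remaining characters
theorem pvLoopB_iff (cs : List Char) : ∀ (w : List Char),
    pvLoopB w cs = true ↔
      ∀ p ∈ pvDangerousPatterns, ∀ y, y <+: PySem.Chars.lower cs → y ≠ [] →
        ¬ p.toList <:+ (w ++ y) := by
  induction cs with
  | nil =>
      intro w
      simp only [pvLoopB, true_iff]
      intro p hp y hy hne
      simp only [PySem.Chars.lower, List.map_nil, List.prefix_nil] at hy
      exact absurd hy hne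
  | cons c t ih =>
      intro w
      have hlow : PySem.Chars.lower (c :: t) =
          PySem.Chars.lowerChar c :: PySem.Chars.lower t := by
        simp [PySem.Chars.lower]
      rw [hlow]
      set lc := PySem.Chars.lowerChar c with hlc
      have hpush : pvPush w c = pvWin (w ++ [lc]) := rfl
      -- the RHS splits into the y = [lc] head case and the longer-prefix cases
      have hsplit :
          (∀ p ∈ pvDangerousPatterns, ∀ y, y <+: lc :: PySem.Chars.lower t → y ≠ [] →
              ¬ p.toList <:+ (w ++ y)) ↔
          ((∀ p ∈ pvDangerousPatterns, ¬ p.toList <:+ (w ++ [lc])) ∧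
           (∀ p ∈ pvDangerousPatterns, ∀ y', y' <+: PySem.Chars.lower t → y' ≠ [] →
              ¬ p.toList <:+ ((w ++ [lc]) ++ y'))) := by
        constructor
        · intro h
          refine ⟨fun p hp => h p hp [lc] ⟨PySem.Chars.lower t, rfl⟩ (by simp), ?_⟩
          intro p hp y' hy' hne'
          have := h p hp (lc :: y') (by
            obtain ⟨z, hz⟩ := hy'
            exact ⟨z, by simp [hz]⟩) (by simp)
          simpa [List.append_assoc] using this
        · rintro ⟨h1, h2⟩ p hp y hy hne
          match y, hy with
          | [], _ => exact absurd rfl hne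
          | y0 :: y', hy =>
            obtain ⟨hz0, hz⟩ : y0 = lc ∧ y' <+: PySem.Chars.lower t := by
              obtain ⟨z, hz⟩ := hy
              injection hz with h1' h2'
              exact ⟨h1', ⟨z, h2'⟩⟩
            subst hz0
            rcases eq_or_ne y' [] with rfl | hne'
            · exact h1 p hp
            · have := h2 p hp y' hz hne'
              simpa [List.append_assoc] using this
      rw [hsplit]
      simp only [pvLoopB]
      by_cases h : pvDangerousPatterns.any
          (fun p => PySem.Chars.endswith (pvPush w c) p.toList) = true
      · rw [if_pos h]
        obtain ⟨p, hp, hsw⟩ := List.any_eq_true.mp h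
        have hsfx : p.toList <:+ w ++ [lc] := by
          have := (PySem.Chars.endswith_iff _ _).mp hsw
          rw [hpush, pvWin_suffix_iff _ _ (pvPatterns_len p hp)] at this
          exact this
        constructor
        · intro hf; exact absurd hf (by simp)
        · rintro ⟨h1, _⟩; exact absurd hsfx (h1 p hp)
      · rw [if_neg h, ih (pvPush w c)]
        have h1 : ∀ p ∈ pvDangerousPatterns, ¬ p.toList <:+ (w ++ [lc]) := by
          intro p hp hsfx
          refine h (List.any_eq_true.mpr ⟨p, hp, ?_⟩)
          rw [PySem.Chars.endswith_iff, hpush,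
            pvWin_suffix_iff _ _ (pvPatterns_len p hp)]
          exact hsfx
        constructor
        · intro hih
          refine ⟨h1, fun p hp y' hy' hne' hsfx => hih p hp y' hy' hne' ?_⟩
          rw [hpush, pvWin_suffix_append_iff _ _ _ (pvPatterns_len p hp)]
          exact hsfx
        · rintro ⟨_, h2⟩ p hp y' hy' hne' hsfx
          rw [hpush, pvWin_suffix_append_iff _ _ _ (pvPatterns_len p hp)] at hsfx
          exact h2 p hp y' hy' hne' hsfx

theorem pvInfix_iff_suffix_prefix (a b : List Char) :
    a <:+: b ↔ ∃ y, a <:+ y ∧ y <+: b := by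
  constructor
  · rintro ⟨s, t, rfl⟩
    exact ⟨s ++ a, ⟨s, rfl⟩, ⟨t, by simp⟩⟩
  · rintro ⟨y, hs, hp⟩
    exact hs.isInfix.trans hp.isInfix

theorem validate_secure_input_eq (input_data : String) :
    validate_secure_input input_data = validate_secure_input_alt input_data := by
  rw [Bool.eq_iff_iff]
  rw [show validate_secure_input input_data
        = pvLoopA pvDangerousPatterns (PySem.Str.lower input_data) from rfl]
  rw [show validate_secure_input_alt input_data = pvLoopB [] input_data.toList from rfl]
  rw [pvLoopA_iff, pvLoopB_iff]
  have hlow : (PySem.Str.lower input_data).toList = PySem.Chars.lower input_data.toList :=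
    PySem.Str.toList_lower input_data
  rw [hlow]
  constructor
  · intro hall p hp y hy hne hsfx
    exact hall p hp ((pvInfix_iff_suffix_prefix _ _).mpr ⟨y, hsfx, hy⟩)
  · intro hall p hp hinf
    obtain ⟨t, hpt, htl⟩ := (pvInfix_iff_suffix_prefix _ _).mp hinf
    have hne : t ≠ [] := by
      intro rfl'
      subst rfl'
      exact pvPatterns_ne p hp (List.suffix_nil.mp hpt)
    exact hall p hp t htl hne (by simpa using hpt)

-- ===== VERDICT (by name: the statement is the Claim_ definition above) =====
theorem validate_secure_input_spec : Claim_equal_validate_secure_input := by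
  intro input_data _
  exact validate_secure_input_eq input_data
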